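-- pv_equiv track=rewrite | github.com/poulsbopete/dashboard-alert-migration | mig-to-kbn/observability_migration/core/verification/field_capabilities.py | preferred_exact_type
-- ===== SOURCE A (Python) =====
-- NUMERIC_FIELD_TYPES = frozenset(
--     {
--         "byte",
--         "short",
--         "integer",
--         "long",
--         "unsigned_long",
--         "half_float",
--         "float",
--         "double",
--         "scaled_float",
--         "counter_long",
--         "counter_double",
--     }
-- )
--
-- TEXT_FIELD_TYPES = frozenset({"text", "match_only_text", "semantic_text"})
--
-- KEYWORD_FIELD_TYPES = frozenset({"keyword", "constant_keyword", "wildcard", "version"})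
--
-- DATE_FIELD_TYPES = frozenset({"date", "date_nanos"})
--
-- BOOLEAN_FIELD_TYPES = frozenset({"boolean"})
--
-- IP_FIELD_TYPES = frozenset({"ip"})
--
-- GEO_FIELD_TYPES = frozenset({"geo_point", "geo_shape", "point", "shape"})
--
-- VECTOR_FIELD_TYPES = frozenset({"dense_vector", "sparse_vector"})
--
-- def preferred_exact_type(field_types: list[str] | tuple[str, ...] | set[str]) -> str:
--     exact_types = {str(field_type or "").strip().lower() for field_type in (field_types or []) if field_type}
--     if not exact_types:
--         return ""
--     ordered_groups = (
--         ("counter_double", "counter_long"),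
--         tuple(sorted(NUMERIC_FIELD_TYPES - {"counter_double", "counter_long"})),
--         tuple(sorted(TEXT_FIELD_TYPES)),
--         tuple(sorted(KEYWORD_FIELD_TYPES)),
--         tuple(sorted(DATE_FIELD_TYPES)),
--         tuple(sorted(BOOLEAN_FIELD_TYPES)),
--         tuple(sorted(IP_FIELD_TYPES)),
--         tuple(sorted(GEO_FIELD_TYPES)),
--         tuple(sorted(VECTOR_FIELD_TYPES)),
--     )
--     for group in ordered_groups:
--         for field_type in group:
--             if field_type in exact_types:
--                 return field_type
--     return sorted(exact_types)[0]
-- ===== SOURCE B (Python) =====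
-- PRIORITY = (
--     "counter_double", "counter_long", "byte", "double", "float", "half_float",
--     "integer", "long", "scaled_float", "short", "unsigned_long",
--     "match_only_text", "semantic_text", "text",
--     "constant_keyword", "keyword", "version", "wildcard",
--     "date", "date_nanos", "boolean", "ip",
--     "geo_point", "geo_shape", "point", "shape",
--     "dense_vector", "sparse_vector",
-- )
--
-- RANK = {t: i for i, t in enumerate(PRIORITY)}
--
--
-- def preferred_exact_type(field_types):
--     best_rank = None
--     best_min = None
--     for ft in (field_types or []):
--         if ft:
--             t = str(ft).strip().lower()
--             r = RANK.get(t)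
--             if r is not None and (best_rank is None or r < best_rank):
--                 best_rank = r
--             if best_min is None or t < best_min:
--                 best_min = t
--     if best_rank is not None:
--         return PRIORITY[best_rank]
--     if best_min is not None:
--         return best_min
--     return ""
-- ===== Notes on version B (the rewrite author's own statement) =====
-- stated objective: alternative
-- what changed: Replaces A's set-building plus scan over nine fixed priority groups by a single pass over the input that tracks the arg-min rank via a precomputed type->priority-index table (and the running minimum string for the unknown-types fallback).
import Mathlib
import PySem

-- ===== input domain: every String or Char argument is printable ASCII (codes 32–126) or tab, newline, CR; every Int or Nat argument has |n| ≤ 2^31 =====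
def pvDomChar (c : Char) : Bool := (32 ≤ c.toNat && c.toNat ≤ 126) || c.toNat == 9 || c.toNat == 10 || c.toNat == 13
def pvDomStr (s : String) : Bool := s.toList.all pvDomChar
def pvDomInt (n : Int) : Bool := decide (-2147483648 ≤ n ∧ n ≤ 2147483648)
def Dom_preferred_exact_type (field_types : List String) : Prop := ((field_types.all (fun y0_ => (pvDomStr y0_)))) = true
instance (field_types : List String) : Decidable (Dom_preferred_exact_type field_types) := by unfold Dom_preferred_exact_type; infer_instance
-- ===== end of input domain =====

-- B replaces A's scan over nine priority groups by a single arg-min pass over the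
-- input using a precomputed rank table (objective: alternative decomposition).

-- ===== PORT A =====
-- the nine priority groups, each in the order A's `sorted` produces
def aGroups : List (List String) :=
  [["counter_double", "counter_long"],
   ["byte", "double", "float", "half_float", "integer", "long", "scaled_float", "short", "unsigned_long"],
   ["match_only_text", "semantic_text", "text"],
   ["constant_keyword", "keyword", "version", "wildcard"],
   ["date", "date_nanos"],
   ["boolean"],
   ["ip"],
   ["geo_point", "geo_shape", "point", "shape"],
   ["dense_vector", "sparse_vector"]]

-- inner 'for field_type in group: if field_type in exact_types: return field_type'
def aScan (g : List String) (s : PySem.Set String) : Option String :=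
  match g with
  | [] => none
  | t :: ts => if PySem.Set.contains s t then some t else aScan ts s

-- outer 'for group in ordered_groups' with the early return
def aScanGroups (gs : List (List String)) (s : PySem.Set String) : Option String :=
  match gs with
  | [] => none
  | g :: gs' =>
    match aScan g s with
    | some t => some t
    | none => aScanGroups gs' s

def preferred_exact_type (field_types : List String) : String :=
  let exact_types : PySem.Set String :=
    PySem.Set.ofList ((field_types.filter (fun ft => ft != "")).map
      (fun ft => PySem.Str.lower (PySem.Str.strip ft)))
  if exact_types = [] then ""
  else
    match aScanGroups aGroups exact_types with
    | some t => t
    | none => (PySem.List.sorted exact_types (fun x => x) false).headD ""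

-- ===== PORT B =====
-- PRIORITY, flattened rank order
def bPriority : List String :=
  ["counter_double", "counter_long", "byte", "double", "float", "half_float",
   "integer", "long", "scaled_float", "short", "unsigned_long",
   "match_only_text", "semantic_text", "text",
   "constant_keyword", "keyword", "version", "wildcard",
   "date", "date_nanos", "boolean", "ip",
   "geo_point", "geo_shape", "point", "shape",
   "dense_vector", "sparse_vector"]

-- RANK = {t: i for i, t in enumerate(PRIORITY)}
def bRank : PySem.Dict String Int :=
  PySem.Dict.ofList ((PySem.List.enumerate bPriority 0).map (fun p => (p.2, p.1)))

def preferred_exact_type_alt (field_types : List String) : String :=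
  let res := field_types.foldl
    (fun (acc : Option Int × Option String) ft =>
      if ft != "" then
        let t := PySem.Str.lower (PySem.Str.strip ft)
        let br :=
          match bRank.get? t, acc.1 with
          | some r, none => some r
          | some r, some b => if r < b then some r else some b
          | none, b => b
        let bm :=
          match acc.2 with
          | none => some t
          | some m => if t < m then some t else some m
        (br, bm)
      else acc)
    ((none, none) : Option Int × Option String)
  match res.1 with
  | some br => PySem.List.pyGetD bPriority br ""   -- rank indices are always in range
  | none =>
    match res.2 with
    | some bm => bm
    | none => ""

-- ===== PRECONDITION & SPEC =====
def Spec_preferred_exact_type (field_types : List String) (out : String) : Prop := out = preferred_exact_type_alt field_types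
instance (field_types : List String) (out : String) : Decidable (Spec_preferred_exact_type field_types out) := by unfold Spec_preferred_exact_type; infer_instance

-- ===== CLAIM (what is proved, stated in full; the proofs are below) =====
def Claim_equal_preferred_exact_type : Prop := ∀ (field_types : List String), Dom_preferred_exact_type field_types → Spec_preferred_exact_type field_types (preferred_exact_type field_types)

-- ===== LEMMAS AND PROOFS =====

-- the normalised, filtered input both programs work on
def pvNorm (ft : String) : String := PySem.Str.lower (PySem.Str.strip ft)
def pvL (field_types : List String) : List String :=
  (field_types.filter (fun ft => ft != "")).map pvNorm

-- B's two accumulator updates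
def pvStepR (a : Option Int) (v : Option Int) : Option Int :=
  match v, a with
  | some r, none => some r
  | some r, some b => if r < b then some r else some b
  | none, b => b

def pvStepS (a : Option String) (t : String) : Option String :=
  match a with
  | none => some t
  | some m => if t < m then some t else some m

-- min-rank fold against a priority list Q
def pvFR (Q : List String) (L : List String) : Option Int :=
  L.foldl (fun a t => pvStepR a ((PySem.List.index? Q t).map (fun k : Nat => (k : Int)))) none

theorem pv_fold_split (fts : List String) (acc : Option Int × Option String) :
    (fts.foldl
      (fun (acc : Option Int × Option String) ft =>
        if ft != "" then
          let t := PySem.Str.lower (PySem.Str.strip ft)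
          let br :=
            match bRank.get? t, acc.1 with
            | some r, none => some r
            | some r, some b => if r < b then some r else some b
            | none, b => b
          let bm :=
            match acc.2 with
            | none => some t
            | some m => if t < m then some t else some m
          (br, bm)
        else acc)
      acc) =
    ((pvL fts).foldl (fun a t => pvStepR a (bRank.get? t)) acc.1,
     (pvL fts).foldl pvStepS acc.2) := by
  induction fts generalizing acc with
  | nil => rfl
  | cons ft fts ih =>
    by_cases h : ft = ""
    · subst h; simpa [pvL, List.filter_cons] using ih acc
    · have hb : (ft != "") = true := by simpa using h
      simp only [List.foldl_cons, hb, if_pos]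
      rw [ih]
      simp [pvL, hb, pvStepR, pvStepS, pvNorm]

theorem pv_rank_eq (t : String) :
    bRank.get? t = (PySem.List.index? bPriority t).map (fun k : Nat => (k : Int)) := by
  by_cases h : t ∈ bPriority
  · simp only [bPriority, List.mem_cons, List.not_mem_nil, or_false] at h
    rcases h with h|h|h|h|h|h|h|h|h|h|h|h|h|h|h|h|h|h|h|h|h|h|h|h|h|h|h|h <;> subst h <;> decide
  · rw [(PySem.List.index?_eq_none_iff _ _).mpr h, Option.map_none,
      PySem.Dict.get?_eq_none_iff_not_mem_keys]
    have hk : bRank.keys = bPriority := by decide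
    rw [hk]; exact h

theorem pvStepR_map_succ (a v : Option Int) :
    pvStepR (a.map (· + 1)) (v.map (· + 1)) = (pvStepR a v).map (· + 1) := by
  cases a with
  | none => cases v <;> rfl
  | some b =>
    cases v with
    | none => rfl
    | some r =>
      simp only [Option.map_some, pvStepR]
      by_cases h : r < b
      · rw [if_pos h, if_pos (by omega : r + 1 < b + 1)]; rfl
      · rw [if_neg h, if_neg (by omega : ¬ r + 1 < b + 1)]; rfl

theorem pv_fold_shift (L : List String) (g : String → Option Int) (acc : Option Int) :
    L.foldl (fun a t => pvStepR a ((g t).map (· + 1))) (acc.map (· + 1)) =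
      (L.foldl (fun a t => pvStepR a (g t)) acc).map (· + 1) := by
  induction L generalizing acc with
  | nil => rfl
  | cons x L ih => simp only [List.foldl_cons, pvStepR_map_succ]; exact ih _

theorem pv_fold_acc_le (L : List String) (g : String → Option Int) (r0 : Int) :
    ∃ r, L.foldl (fun a t => pvStepR a (g t)) (some r0) = some r ∧ r ≤ r0 := by
  induction L generalizing r0 with
  | nil => exact ⟨r0, rfl, le_refl _⟩
  | cons x L ih =>
    simp only [List.foldl_cons]
    cases hg : g x with
    | none => exact ih r0
    | some v =>
      by_cases h : v < r0
      · rw [show pvStepR (some r0) (some v) = some v by simp [pvStepR, h]]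
        obtain ⟨r, hr, hle⟩ := ih v
        exact ⟨r, hr, le_trans hle (le_of_lt h)⟩
      · rw [show pvStepR (some r0) (some v) = some r0 by simp [pvStepR, h]]
        exact ih r0

theorem pv_fold_some (L : List String) (g : String → Option Int) (acc : Option Int)
    (t : String) (ht : t ∈ L) (v : Int) (hv : g t = some v) :
    ∃ r, L.foldl (fun a t => pvStepR a (g t)) acc = some r ∧ r ≤ v := by
  induction L generalizing acc with
  | nil => cases ht
  | cons x L ih =>
    rcases List.mem_cons.mp ht with h | h
    · subst h
      simp only [List.foldl_cons]
      rw [hv]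
      cases acc with
      | none => exact pv_fold_acc_le L g v
      | some b =>
        by_cases hb : v < b
        · rw [show pvStepR (some b) (some v) = some v by simp [pvStepR, hb]]
          exact pv_fold_acc_le L g v
        · rw [show pvStepR (some b) (some v) = some b by simp [pvStepR, hb]]
          obtain ⟨r, hr, hle⟩ := pv_fold_acc_le L g b
          exact ⟨r, hr, le_trans hle (not_lt.mp hb)⟩
    · simp only [List.foldl_cons]; exact ih _ h

theorem pv_fold_val (L : List String) (g : String → Option Int) (acc : Option Int) (r : Int)
    (h : L.foldl (fun a t => pvStepR a (g t)) acc = some r) :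
    acc = some r ∨ ∃ t ∈ L, g t = some r := by
  induction L generalizing acc with
  | nil => exact Or.inl h
  | cons x L ih =>
    simp only [List.foldl_cons] at h
    rcases ih _ h with h' | ⟨t, ht, hgt⟩
    · cases hg : g x with
      | none => rw [hg] at h'; exact Or.inl h'
      | some v =>
        rw [hg] at h'
        cases acc with
        | none => exact Or.inr ⟨x, List.mem_cons_self, hg.trans h'⟩
        | some b =>
          simp only [pvStepR] at h'
          split_ifs at h' with hvb
          · exact Or.inr ⟨x, List.mem_cons_self, hg.trans h'⟩
          · exact Or.inl h'
    · exact Or.inr ⟨t, List.mem_cons_of_mem _ ht, hgt⟩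

theorem pv_fr_nonneg (Q L : List String) (r : Int) (h : pvFR Q L = some r) : 0 ≤ r := by
  rcases pv_fold_val _ _ _ _ h with h' | ⟨t, _, hgt⟩
  · cases h'
  · cases hidx : PySem.List.index? Q t with
    | none => rw [hidx] at hgt; cases hgt
    | some k =>
      rw [hidx] at hgt
      simp only [Option.map_some, Option.some_inj] at hgt
      omega

theorem pv_key1 (Q L : List String) :
    (pvFR Q L).map (fun r => PySem.List.pyGetD Q r "") =
      Q.find? (fun t => L.contains t) := by
  induction Q generalizing L with
  | nil =>
    have hnone : pvFR [] L = none := by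
      rw [pvFR, PySem.List.foldl_congr_mem (g := fun a _ => a)]
      · exact PySem.List.foldl_ignore _ _
      · intro acc t _; rfl
    rw [hnone]; rfl
  | cons p Q ih =>
    by_cases hp : p ∈ L
    · have hfind : (p :: Q).find? (fun t => L.contains t) = some p := by simp [hp]
      have hg : (PySem.List.index? (p :: Q) p).map (fun k : Nat => (k : Int)) = some 0 := by
        rw [PySem.List.index?_cons_self]; rfl
      obtain ⟨r, hr, hle⟩ :=
        pv_fold_some L (fun t => (PySem.List.index? (p :: Q) t).map (fun k : Nat => (k : Int)))
          none p hp 0 hg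
      have hr' : pvFR (p :: Q) L = some r := hr
      have h0 : r = 0 := le_antisymm hle (pv_fr_nonneg _ _ _ hr')
      rw [hfind, hr', h0, Option.map_some]
      rw [show (0 : Int) = ((0 : Nat) : Int) from rfl, PySem.List.pyGetD_natCast]
      rfl
    · have hfind : (p :: Q).find? (fun t => L.contains t) = Q.find? (fun t => L.contains t) := by
        simp [hp]
      have hshift : pvFR (p :: Q) L = (pvFR Q L).map (· + 1) := by
        rw [pvFR, pvFR]
        rw [PySem.List.foldl_congr_mem
          (g := fun a t => pvStepR a (((PySem.List.index? Q t).map (fun k : Nat => (k : Int))).map (· + 1)))]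
        · exact (by
            simpa using pv_fold_shift L
              (fun t => (PySem.List.index? Q t).map (fun k : Nat => (k : Int))) none)
        · intro acc t htL
          have hne : p ≠ t := fun h => hp (h ▸ htL)
          rw [PySem.List.index?_cons_of_ne Q hne]
          cases PySem.List.index? Q t <;> simp
      rw [hfind, hshift, ← ih L]
      cases hfr : pvFR Q L with
      | none => rfl
      | some r =>
        obtain ⟨k, hk⟩ := Int.eq_ofNat_of_zero_le (pv_fr_nonneg _ _ _ hfr)
        subst hk
        simp only [Option.map_some, Option.some_inj]
        rw [show ((k : Int) + 1) = ((k + 1 : Nat) : Int) by push_cast; ring]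
        rw [PySem.List.pyGetD_natCast, PySem.List.pyGetD_natCast]
        simp

theorem pv_scan_eq (g : List String) (s : PySem.Set String) :
    aScan g s = g.find? (fun t => PySem.Set.contains s t) := by
  induction g with
  | nil => rfl
  | cons t ts ih =>
    rw [aScan, List.find?_cons]
    cases h : PySem.Set.contains s t
    · simp [ih]
    · simp

theorem pv_scanGroups_eq (gs : List (List String)) (s : PySem.Set String) :
    aScanGroups gs s = gs.flatten.find? (fun t => PySem.Set.contains s t) := by
  induction gs with
  | nil => rfl
  | cons g gs ih =>
    rw [aScanGroups, List.flatten_cons, List.find?_append, pv_scan_eq, ih]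
    cases g.find? (fun t => PySem.Set.contains s t) <;> simp

theorem pvStepS_some (a y : String) : pvStepS (some a) y = some (min a y) := by
  simp only [pvStepS, min_def]
  split_ifs with h1 h2 h2
  · exact absurd h2 (not_le.mpr h1)
  · rfl
  · rfl
  · exact absurd (lt_of_not_ge h2) h1

theorem pv_foldS_acc (t : List String) (a : String) :
    t.foldl pvStepS (some a) = some (t.foldl min a) := by
  induction t generalizing a with
  | nil => rfl
  | cons y t ih => rw [List.foldl_cons, pvStepS_some, List.foldl_cons]; exact ih _

theorem pv_foldS_min (x : String) (t : List String) :
    (x :: t).foldl pvStepS none = some (t.foldl min x) := by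
  rw [List.foldl_cons]
  exact pv_foldS_acc t x

theorem pv_sorted_head (x : String) (t : List String) :
    (PySem.List.sorted (PySem.Set.ofList (x :: t)) (fun y => y) false).headD "" =
      t.foldl min x := by
  have hmem : x ∈ PySem.Set.ofList (x :: t) :=
    (PySem.Set.mem_ofList _ _).mpr List.mem_cons_self
  cases hs : PySem.List.sorted (PySem.Set.ofList (x :: t)) (fun y => y) false with
  | nil =>
    exfalso
    have := (PySem.List.sorted_eq_nil_iff _ _ _).mp hs
    rw [this] at hmem
    cases hmem
  | cons m tl =>
    have hmS : m ∈ PySem.Set.ofList (x :: t) := by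
      have : m ∈ PySem.List.sorted (PySem.Set.ofList (x :: t)) (fun y => y) false := by
        rw [hs]; exact List.mem_cons_self
      exact (PySem.List.mem_sorted _ _ _ _).mp this
    have hmL : m ∈ x :: t := (PySem.Set.mem_ofList _ _).mp hmS
    have hmin_mem : t.foldl min x ∈ x :: t := by
      rcases PySem.List.foldl_min_mem t x with h | h
      · rw [h]; exact List.mem_cons_self
      · exact List.mem_cons_of_mem _ h
    have h1 : m ≤ t.foldl min x := by
      have := PySem.List.key_head_sorted_le _ (fun y => y) hs
      exact this _ ((PySem.Set.mem_ofList _ _).mpr hmin_mem)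
    have h2 : t.foldl min x ≤ m := by
      rcases List.mem_cons.mp hmL with h | h
      · rw [h]; exact (PySem.List.foldl_min_le t x).1
      · exact (PySem.List.foldl_min_le t x).2 m h
    simp [le_antisymm h1 h2]

-- ===== VERDICT (by name: the statement is the Claim_ definition above) =====
theorem preferred_exact_type_spec : Claim_equal_preferred_exact_type := by
  unfold Claim_equal_preferred_exact_type Spec_preferred_exact_type
  intro fts _
  show preferred_exact_type fts = preferred_exact_type_alt fts
  have hA : (fts.filter (fun ft => ft != "")).map
      (fun ft => PySem.Str.lower (PySem.Str.strip ft)) = pvL fts := rfl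
  rw [preferred_exact_type, preferred_exact_type_alt]
  simp only [pv_fold_split, hA]
  have hB1 : (pvL fts).foldl (fun a u => pvStepR a (bRank.get? u)) none = pvFR bPriority (pvL fts) :=
    PySem.List.foldl_congr_mem _ _ _ _ (fun acc u _ => by rw [pv_rank_eq])
  cases hL : pvL fts with
  | nil => rfl
  | cons x t =>
    have hSne : PySem.Set.ofList (x :: t) ≠ [] := by
      intro h
      have hx : x ∈ PySem.Set.ofList (x :: t) :=
        (PySem.Set.mem_ofList _ _).mpr List.mem_cons_self
      rw [h] at hx
      cases hx
    rw [hL] at hB1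
    rw [if_neg hSne, pv_scanGroups_eq]
    have hflat : aGroups.flatten = bPriority := rfl
    rw [hflat]
    have hpred : (fun u => PySem.Set.contains (PySem.Set.ofList (x :: t)) u) =
        (fun u => (x :: t).contains u) := by
      funext u
      simp [PySem.Set.contains, PySem.Set.mem_ofList]
    rw [hpred, ← pv_key1 bPriority (x :: t), hB1]
    cases hfr : pvFR bPriority (x :: t) with
    | some r => simp
    | none =>
      rw [pv_foldS_min]
      simpa using pv_sorted_head x t
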